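-- pv_equiv track=rewrite | github.com/SamrawitDawit/competitive-programming | leet-code-solutions/sum-of-even-numbers-after-queries.py | sumEvenAfterQueries
-- ===== SOURCE A (Python) =====
-- from typing import List
--
-- def sumEvenAfterQueries(nums: List[int], queries: List[List[int]]) -> List[int]:
--     sum_of_nums = 0
--     res = []
--     for num in nums:
--         if num%2 == 0:
--             sum_of_nums += num
--     for i in range(len(nums)):
--         indx = queries[i][1]
--         value = queries[i][0]
--         if nums[indx] % 2 == 0 and (nums[indx] + value) % 2 == 0:
--             sum_of_nums -= nums[indx]
--             nums[indx] += value
--             sum_of_nums += nums[indx]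
--         elif nums[indx] % 2 != 0 and (nums[indx] + value) % 2 == 0:
--             nums[indx] += value
--             sum_of_nums += nums[indx]
--         elif nums[indx] % 2 == 0 and (nums[indx] + value) % 2 != 0:
--             sum_of_nums -= nums[indx]
--             nums[indx] += value
--         else:
--             nums[indx] += value
--         res.append(sum_of_nums)
--     return res
-- ===== SOURCE B (Python) =====
-- def sumEvenAfterQueries(nums, queries):
--     # Like the original, this mutates nums in place (one += per query).
--     res = []
--     for i in range(len(nums)):
--         value, indx = queries[i][0], queries[i][1]
--         nums[indx] += value
--         res.append(sum(x for x in nums if x % 2 == 0))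
--     return res
-- ===== Notes on version B (the rewrite author's own statement) =====
-- stated objective: alternative
-- what changed: B drops the running even-sum and its four parity branches: after each in-place update it recomputes the even-sum by a fresh full scan of nums, trading the incremental O(n+q) maintenance for an O(n*q) rescan with no case analysis.
import Mathlib
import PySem

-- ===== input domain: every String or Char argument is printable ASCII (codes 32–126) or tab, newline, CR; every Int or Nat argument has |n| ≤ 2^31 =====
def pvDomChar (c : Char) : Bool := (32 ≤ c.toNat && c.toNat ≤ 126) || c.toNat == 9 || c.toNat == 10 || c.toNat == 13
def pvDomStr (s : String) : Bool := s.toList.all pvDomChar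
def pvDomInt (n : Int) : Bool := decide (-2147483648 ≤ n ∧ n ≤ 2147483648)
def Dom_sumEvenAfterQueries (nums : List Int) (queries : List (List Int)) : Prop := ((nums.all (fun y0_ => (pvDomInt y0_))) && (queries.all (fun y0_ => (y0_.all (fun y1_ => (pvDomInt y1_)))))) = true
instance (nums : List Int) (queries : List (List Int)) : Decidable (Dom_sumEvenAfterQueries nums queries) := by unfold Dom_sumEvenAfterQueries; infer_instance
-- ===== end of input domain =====

-- B replaces A's running even-sum and its four parity branches by a fresh full scan of nums
-- after each in-place update (objective: alternative — simpler control flow, more scanning).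
-- Both Pythons mutate `nums` in place identically; the equivalence proved here is about the return value.

-- ===== PORT A =====
-- the main query loop of A: state = (remaining indices, nums, sum_of_nums, res)
def pvLoopA (queries : List (List Int)) : List Int → List Int → Int → List Int → List Int
  | [], _nums, _s, res => res
  | i :: rest, nums, s, res =>
      let indx := PySem.List.pyGetD (PySem.List.pyGetD queries i []) 1 0
      let value := PySem.List.pyGetD (PySem.List.pyGetD queries i []) 0 0
      let cur := PySem.List.pyGetD nums indx 0
      if PySem.Int.mod cur 2 = 0 ∧ PySem.Int.mod (cur + value) 2 = 0 then
        let s1 := s - cur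
        let nums1 := PySem.List.pySetD nums indx (cur + value)
        let s2 := s1 + PySem.List.pyGetD nums1 indx 0
        pvLoopA queries rest nums1 s2 (res ++ [s2])
      else if PySem.Int.mod cur 2 ≠ 0 ∧ PySem.Int.mod (cur + value) 2 = 0 then
        let nums1 := PySem.List.pySetD nums indx (cur + value)
        let s2 := s + PySem.List.pyGetD nums1 indx 0
        pvLoopA queries rest nums1 s2 (res ++ [s2])
      else if PySem.Int.mod cur 2 = 0 ∧ PySem.Int.mod (cur + value) 2 ≠ 0 then
        let s2 := s - cur
        let nums1 := PySem.List.pySetD nums indx (cur + value)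
        pvLoopA queries rest nums1 s2 (res ++ [s2])
      else
        let nums1 := PySem.List.pySetD nums indx (cur + value)
        pvLoopA queries rest nums1 s (res ++ [s])

def sumEvenAfterQueries (nums : List Int) (queries : List (List Int)) : List Int :=
  let s0 := nums.foldl (fun s num => if PySem.Int.mod num 2 = 0 then s + num else s) 0
  pvLoopA queries (PySem.List.pyRange 0 (PySem.List.len nums) 1) nums s0 []

-- ===== PORT B =====
-- sum(x for x in nums if x % 2 == 0)
def pvEvenScan (nums : List Int) : Int :=
  (nums.filter (fun x => PySem.Int.mod x 2 = 0)).sum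

def pvLoopB (queries : List (List Int)) : List Int → List Int → List Int → List Int
  | [], _nums, res => res
  | i :: rest, nums, res =>
      let value := PySem.List.pyGetD (PySem.List.pyGetD queries i []) 0 0
      let indx := PySem.List.pyGetD (PySem.List.pyGetD queries i []) 1 0
      let nums1 := PySem.List.pySetD nums indx (PySem.List.pyGetD nums indx 0 + value)
      pvLoopB queries rest nums1 (res ++ [pvEvenScan nums1])

def sumEvenAfterQueries_alt (nums : List Int) (queries : List (List Int)) : List Int :=
  pvLoopB queries (PySem.List.pyRange 0 (PySem.List.len nums) 1) nums []

-- ===== PRECONDITION & SPEC =====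
-- Pre_ excludes exactly the inputs on which the Python A raises IndexError: A indexes
-- queries[i] and nums[queries[i][1]] for every i < len(nums).
def Pre_sumEvenAfterQueries (nums : List Int) (queries : List (List Int)) : Prop :=
  nums.length ≤ queries.length ∧
  ∀ i : Nat, i < nums.length →
    2 ≤ (queries.getD i []).length ∧
    PySem.Raise.InRange nums.length ((queries.getD i []).getD 1 0)
instance (nums : List Int) (queries : List (List Int)) : Decidable (Pre_sumEvenAfterQueries nums queries) := by unfold Pre_sumEvenAfterQueries; infer_instance

def pvWitness_sumEvenAfterQueries : List Int × List (List Int) := ([1, 2], [[3, 0], [2, 1]])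

def Spec_sumEvenAfterQueries (nums : List Int) (queries : List (List Int)) (out : List Int) : Prop := out = sumEvenAfterQueries_alt nums queries
instance (nums : List Int) (queries : List (List Int)) (out : List Int) : Decidable (Spec_sumEvenAfterQueries nums queries out) := by unfold Spec_sumEvenAfterQueries; infer_instance

-- ===== CLAIM (what is proved, stated in full; the proofs are below) =====
def Claim_equal_sumEvenAfterQueries : Prop := ∀ (nums : List Int) (queries : List (List Int)), Dom_sumEvenAfterQueries nums queries → Pre_sumEvenAfterQueries nums queries → Spec_sumEvenAfterQueries nums queries (sumEvenAfterQueries nums queries)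

-- ===== LEMMAS AND PROOFS =====

theorem pv_scan_cons (x : Int) (l : List Int) :
    pvEvenScan (x :: l) = (if (2:Int) ∣ x then x else 0) + pvEvenScan l := by
  by_cases hx : (2:Int) ∣ x <;> simp [pvEvenScan, hx]

-- A's initialisation fold computes the same even-sum as B's scan.
theorem pv_fold_eq_scan (l : List Int) (s : Int) :
    l.foldl (fun s num => if PySem.Int.mod num 2 = 0 then s + num else s) s = s + pvEvenScan l := by
  induction l generalizing s with
  | nil => simp [pvEvenScan]
  | cons x xs ih =>
    rw [List.foldl_cons, ih, pv_scan_cons]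
    simp only [PySem.Int.mod_eq_zero_iff_dvd]
    split_ifs with hx <;> ring

-- how the scanned even-sum changes under a point update
theorem pv_scan_set (l : List Int) (j : Nat) (y : Int) (hj : j < l.length) :
    pvEvenScan (l.set j y) =
      pvEvenScan l - (if (2:Int) ∣ l.getD j 0 then l.getD j 0 else 0)
        + (if (2:Int) ∣ y then y else 0) := by
  induction l generalizing j with
  | nil => simp at hj
  | cons x xs ih =>
    cases j with
    | zero =>
      rw [List.set_cons_zero, pv_scan_cons, pv_scan_cons, List.getD_cons_zero]
      ring
    | succ k =>
      have hk : k < xs.length := by simpa using hj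
      rw [List.set_cons_succ, pv_scan_cons, pv_scan_cons, List.getD_cons_succ, ih k hk]
      ring

theorem pv_idx_some_lt (n : Nat) (i : Int) (j : Nat) (h : PySem.List.pyIdx? n i = some j) :
    j < n := by
  simp only [PySem.List.pyIdx?] at h
  split_ifs at h with h1 h2 h3 <;> simp_all <;> omega

-- the loop invariant: when A's running sum equals the scan of the current nums, the loops agree
theorem pv_loop_eq (queries : List (List Int)) (idxs : List Int) :
    ∀ (nums res : List Int),
      pvLoopA queries idxs nums (pvEvenScan nums) res = pvLoopB queries idxs nums res := by
  induction idxs with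
  | nil => intro nums res; rfl
  | cons i rest ih =>
    intro nums res
    rw [pvLoopA, pvLoopB]
    simp only [ne_eq, PySem.Int.mod_eq_zero_iff_dvd]
    set q := PySem.List.pyGetD queries i [] with hq
    set indx := PySem.List.pyGetD q 1 0 with hindx
    set value := PySem.List.pyGetD q 0 0 with hvalue
    cases hidx : PySem.List.pyIdx? nums.length indx with
    | none =>
      have hset : ∀ v : Int, PySem.List.pySetD nums indx v = nums := by
        intro v; simp [PySem.List.pySetD, PySem.List.pySet?, hidx]
      have hget : PySem.List.pyGetD nums indx 0 = 0 := by
        simp [PySem.List.pyGetD, PySem.List.pyGet?, hidx]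
      simp only [hget, hset, zero_add, sub_zero, add_zero]
      by_cases hv : (2:Int) ∣ value <;> simp [hv] <;> exact ih nums _
    | some j =>
      have hj : j < nums.length := pv_idx_some_lt _ _ _ hidx
      have hcur : PySem.List.pyGetD nums indx 0 = nums.getD j 0 := by
        simp [PySem.List.pyGetD, PySem.List.pyGet?, hidx, List.getD, List.getElem?_eq_getElem hj]
      have hset : ∀ v : Int, PySem.List.pySetD nums indx v = nums.set j v := by
        intro v; simp [PySem.List.pySetD, PySem.List.pySet?, hidx]
      have hget1 : ∀ v : Int, PySem.List.pyGetD (nums.set j v) indx 0 = v := by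
        intro v
        have hl : (nums.set j v).length = nums.length := by simp
        simp [PySem.List.pyGetD, PySem.List.pyGet?, hl, hidx,
          List.getElem?_eq_getElem (hl ▸ hj)]
      simp only [hcur, hset, hget1]
      set cur := nums.getD j 0 with hcurdef
      have hscan := pv_scan_set nums j (cur + value) hj
      rw [← hcurdef] at hscan
      by_cases h1 : (2:Int) ∣ cur <;> by_cases h2 : (2:Int) ∣ (cur + value) <;>
        simp only [h1, h2, and_true, and_false, and_self, not_true_eq_false,
          not_false_eq_true, if_true, if_false]
      · rw [show pvEvenScan nums - cur + (cur + value) = pvEvenScan (nums.set j (cur + value)) from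
          by rw [hscan]; simp [h1, h2]]
        exact ih _ _
      · rw [show pvEvenScan nums - cur = pvEvenScan (nums.set j (cur + value)) from
          by rw [hscan]; simp [h1, h2]]
        exact ih _ _
      · rw [show pvEvenScan nums + (cur + value) = pvEvenScan (nums.set j (cur + value)) from
          by rw [hscan]; simp [h1, h2]]
        exact ih _ _
      · rw [show pvEvenScan nums = pvEvenScan (nums.set j (cur + value)) from
          by rw [hscan]; simp [h1, h2]]
        exact ih _ _

-- ===== VERDICT (by name: the statement is the Claim_ definition above) =====
theorem sumEvenAfterQueries_spec : Claim_equal_sumEvenAfterQueries := by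
  intro nums queries _hDom _hPre
  unfold Spec_sumEvenAfterQueries sumEvenAfterQueries sumEvenAfterQueries_alt
  rw [pv_fold_eq_scan, zero_add]
  exact pv_loop_eq queries _ nums []
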